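-- pv_equiv track=rewrite | github.com/gh0stintheshe11/LeetCode-Solutions | solutions/3030.find-the-k-th-lucky-number/Python3.py | kthLuckyNumber
-- ===== SOURCE A (Python) =====
-- def kthLuckyNumber(k: int) -> str:
--     c = 0
--     prefix_count = 0
--     # Calculate the number of digits in the k-th lucky number
--     while k > prefix_count:
--         c += 1
--         prefix_count += 2 ** c
--
--     # Roll back to the previous level
--     prefix_count -= 2 ** c
--     # Determine the position within numbers of c digits
--     position = k - prefix_count - 1
--     # Convert position to binary and map 0 to '4' and 1 to '7'
--     binary_representation = bin(position)[2:].zfill(c)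
--     return ''.join('4' if x == '0' else '7' for x in binary_representation)
-- ===== SOURCE B (Python) =====
-- def kthLuckyNumber(k: int) -> str:
--     # closed form: binary of k+1 with the leading bit removed, each remaining bit mapped to its lucky digit
--     return bin(k + 1)[3:].translate(str.maketrans('01', '47'))
-- ===== Notes on version B (the rewrite author's own statement) =====
-- stated objective: simpler
-- what changed: Replaced the digit-count while loop, the rollback/position arithmetic and zfill by a one-line closed form: the k-th lucky number is the binary representation of k+1 with its leading bit removed, each remaining bit translated to the corresponding lucky digit.
-- outside the precondition, e.g. on kthLuckyNumber(0): A returns '4', B returns ''; on kthLuckyNumber(-1): A returns '77', B returns ''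
import Mathlib
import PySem

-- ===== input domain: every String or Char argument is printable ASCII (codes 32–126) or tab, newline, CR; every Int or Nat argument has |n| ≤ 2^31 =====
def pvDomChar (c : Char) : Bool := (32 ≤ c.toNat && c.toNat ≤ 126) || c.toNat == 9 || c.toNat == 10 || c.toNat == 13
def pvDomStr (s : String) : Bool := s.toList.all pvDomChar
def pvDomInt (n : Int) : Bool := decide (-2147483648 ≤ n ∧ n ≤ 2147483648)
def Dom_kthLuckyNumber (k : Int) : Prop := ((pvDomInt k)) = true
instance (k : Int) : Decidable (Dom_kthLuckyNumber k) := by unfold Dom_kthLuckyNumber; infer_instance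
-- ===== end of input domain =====

-- B replaces A's digit-count loop + zfill by a closed form: binary of k+1 with the top bit dropped, each bit mapped to its lucky digit (simpler, same asymptotics).
set_option maxRecDepth 4000


-- ===== PORT A =====
-- the 'while k > prefix_count: c += 1; prefix_count += 2 ** c' loop
def pvLoopA (k c pc : Int) : Int × Int :=
  if pc < k then pvLoopA k (c + 1) (pc + 2 ^ (c + 1).toNat) else (c, pc)
termination_by (k - pc).toNat
decreasing_by
  have hpow : (0:Int) < 2 ^ (c + 1).toNat := pow_pos (by norm_num) _
  omega

def kthLuckyNumber (k : Int) : String :=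
  let r := pvLoopA k 0 0
  -- prefix_count -= 2 ** c
  let prefixCount := r.2 - 2 ^ r.1.toNat
  -- position = k - prefix_count - 1
  let position := k - prefixCount - 1
  -- bin(position)[2:].zfill(c)
  let binaryRepresentation :=
    PySem.Chars.zfill (PySem.List.slice (PySem.Int.toBinChars0b position) (some 2) none) r.1
  String.mk (binaryRepresentation.map (fun x => if x = '0' then '4' else '7'))

-- ===== PORT B =====
-- bin(k + 1)[3:].translate(str.maketrans('01', '47'))
def kthLuckyNumber_alt (k : Int) : String :=
  String.mk ((PySem.List.slice (PySem.Int.toBinChars0b (k + 1)) (some 3) none).map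
    (fun x => if x = '0' then '4' else if x = '1' then '7' else x))

-- ===== PRECONDITION & SPEC =====
-- Pre_ excludes inputs outside the problem's 1-indexed domain: for k ≤ 0 the position A feeds to bin() is
-- negative, no k-th lucky number exists, and neither program's string there is a value of the function; see claim.json cites.
def Pre_kthLuckyNumber (k : Int) : Prop := 1 ≤ k
instance (k : Int) : Decidable (Pre_kthLuckyNumber k) := by unfold Pre_kthLuckyNumber; infer_instance
def pvWitness_kthLuckyNumber : Int := (5)

def Spec_kthLuckyNumber (k : Int) (out : String) : Prop := out = kthLuckyNumber_alt k
instance (k : Int) (out : String) : Decidable (Spec_kthLuckyNumber k out) := by unfold Spec_kthLuckyNumber; infer_instance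

-- ===== CLAIM (what is proved, stated in full; the proofs are below) =====
def Claim_equal_kthLuckyNumber : Prop := ∀ (k : Int), Dom_kthLuckyNumber k → Pre_kthLuckyNumber k → Spec_kthLuckyNumber k (kthLuckyNumber k)

-- ===== LEMMAS AND PROOFS =====

-- Nat.toDigitsCore basics
theorem pvTdcAcc (b : Nat) : ∀ (f n : Nat) (l : List Char),
    Nat.toDigitsCore b f n l = Nat.toDigitsCore b f n [] ++ l := by
  intro f
  induction f with
  | zero => intro n l; rfl
  | succ f ih =>
    intro n l
    simp only [Nat.toDigitsCore]
    by_cases h : n / b = 0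
    · simp [h]
    · simp only [h, if_false]
      rw [ih (n / b) ((n % b).digitChar :: l), ih (n / b) [(n % b).digitChar]]
      simp

theorem pvTdcFuel : ∀ (f f' n : Nat), n < f → n < f' →
    Nat.toDigitsCore 2 f n [] = Nat.toDigitsCore 2 f' n [] := by
  intro f
  induction f with
  | zero => intro f' n h; omega
  | succ f ih =>
    intro f' n hf hf'
    cases f' with
    | zero => omega
    | succ f' =>
      simp only [Nat.toDigitsCore]
      by_cases h : n / 2 = 0
      · simp [h]
      · simp only [h, if_false]
        have hn : 2 ≤ n := by omega
        have h2 : n / 2 < n := Nat.div_lt_self (by omega) (by omega)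
        rw [pvTdcAcc 2 f (n / 2), pvTdcAcc 2 f' (n / 2),
          ih (f') (n / 2) (by omega) (by omega)]

theorem pvToDigitsRec (n : Nat) (h : 2 ≤ n) :
    Nat.toDigits 2 n = Nat.toDigits 2 (n / 2) ++ [(n % 2).digitChar] := by
  have h0 : n / 2 ≠ 0 := by omega
  show Nat.toDigitsCore 2 (n + 1) n [] = _
  simp only [Nat.toDigitsCore, h0, if_false]
  rw [pvTdcAcc 2 n (n / 2)]
  rw [pvTdcFuel n (n / 2 + 1) (n / 2) (Nat.div_lt_self (by omega) (by omega)) (by omega)]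
  rfl

theorem pvToDigitsMem (n : Nat) : ∀ x ∈ Nat.toDigits 2 n, x = '0' ∨ x = '1' := by
  induction n using Nat.strong_induction_on with
  | _ n ih =>
    by_cases h : n < 2
    · interval_cases n
      · rw [show Nat.toDigits 2 0 = ['0'] from rfl]; simp
      · rw [show Nat.toDigits 2 1 = ['1'] from rfl]; simp
    · rw [pvToDigitsRec n (by omega)]
      intro x hx
      rcases List.mem_append.mp hx with h1 | h1
      · exact ih (n / 2) (Nat.div_lt_self (by omega) (by omega)) x h1
      · have hm : n % 2 = 0 ∨ n % 2 = 1 := by omega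
        simp only [List.mem_singleton] at h1
        rcases hm with hm | hm <;> subst h1 <;> simp [hm, Nat.digitChar]

theorem pvToDigitsNeNil (n : Nat) : Nat.toDigits 2 n ≠ [] := by
  by_cases h : n < 2
  · interval_cases n
    · rw [show Nat.toDigits 2 0 = ['0'] from rfl]; simp
    · rw [show Nat.toDigits 2 1 = ['1'] from rfl]; simp
  · rw [pvToDigitsRec n (by omega)]; simp

-- zfill on a pure digit string is left-padding with '0'
theorem pvZfillDigits (cs : List Char) (c : Nat) (hlen : cs.length ≤ c)
    (hd : ∀ x ∈ cs, x = '0' ∨ x = '1') (hne : cs ≠ []) :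
    PySem.Chars.zfill cs (c : Int) = List.replicate (c - cs.length) '0' ++ cs := by
  unfold PySem.Chars.zfill
  by_cases h : (c : Int) ≤ (cs.length : Int)
  · have hc : c = cs.length := by omega
    subst hc
    simp
  · simp only [h, if_false]
    cases cs with
    | nil => exact absurd rfl hne
    | cons c0 rest =>
      have h0 : c0 = '0' ∨ c0 = '1' := hd c0 (by simp)
      have hpm : ¬ (c0 = '+' ∨ c0 = '-') := by rcases h0 with h0 | h0 <;> subst h0 <;> decide
      simp only [hpm, if_false]
      rw [Int.toNat_natCast]

-- binary of 2^c + p (c ≥ 1, p < 2^c) is '1' followed by p's binary zero-padded to width c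
theorem pvBinSplit : ∀ (c p : Nat), 1 ≤ c → p < 2 ^ c →
    Nat.toDigits 2 (2 ^ c + p) =
      '1' :: (List.replicate (c - (Nat.toDigits 2 p).length) '0' ++ Nat.toDigits 2 p) := by
  intro c
  induction c with
  | zero => intro p h; omega
  | succ c ih =>
    intro p _ hp
    by_cases hc : c = 0
    · subst hc
      interval_cases p <;> rfl
    · have hc1 : 1 ≤ c := by omega
      have hn : 2 ≤ 2 ^ (c + 1) + p := by
        have : 2 ≤ 2 ^ (c + 1) := by
          calc 2 = 2 ^ 1 := by norm_num
          _ ≤ 2 ^ (c + 1) := Nat.pow_le_pow_right (by norm_num) (by omega)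
        omega
      rw [pvToDigitsRec _ hn]
      have hdiv : (2 ^ (c + 1) + p) / 2 = 2 ^ c + p / 2 := by
        have : 2 ^ (c + 1) = 2 * 2 ^ c := by ring
        omega
      have hmod : (2 ^ (c + 1) + p) % 2 = p % 2 := by
        have : 2 ^ (c + 1) = 2 * 2 ^ c := by ring
        omega
      have hp2 : p / 2 < 2 ^ c := by
        have : 2 ^ (c + 1) = 2 * 2 ^ c := by ring
        omega
      rw [hdiv, hmod, ih (p / 2) hc1 hp2]
      by_cases hpl : 2 ≤ p
      · have hrec := pvToDigitsRec p hpl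
        rw [hrec]
        have hlen2 : c + 1 - (Nat.toDigits 2 (p / 2) ++ [(p % 2).digitChar]).length
            = c - (Nat.toDigits 2 (p / 2)).length := by simp
        rw [hlen2]
        simp
      · have hrep : List.replicate c '0' = List.replicate (c - 1) '0' ++ ['0'] := by
          have : c = (c - 1) + 1 := by omega
          rw [this, List.replicate_succ']
          simp
        interval_cases p
        · show '1' :: (List.replicate (c - 1) '0' ++ ['0']) ++ ['0'] =
            '1' :: (List.replicate (c + 1 - 1) '0' ++ ['0'])
          simp only [Nat.add_sub_cancel, hrep]
          simp
        · show '1' :: (List.replicate (c - 1) '0' ++ ['0']) ++ ['1'] =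
            '1' :: (List.replicate (c + 1 - 1) '0' ++ ['1'])
          simp only [Nat.add_sub_cancel, hrep]
          simp

-- the loop: starting at level c with prefix 2^(c+1)-2, it stops at level C where 2^C ≤ k+1 < 2^(C+1)
theorem pvLoopClimb (k : Int) (C : Nat) (hlo : (2:Int) ^ C ≤ k + 1) (hhi : k + 1 < 2 ^ (C + 1)) :
    ∀ (n c : Nat), c + n = C →
      pvLoopA k (c : Int) ((2:Int) ^ (c + 1) - 2) = ((C : Int), (2:Int) ^ (C + 1) - 2) := by
  intro n
  induction n with
  | zero =>
    intro c hc
    have hc' : c = C := by omega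
    subst hc'
    rw [pvLoopA]
    have : ¬ ((2:Int) ^ (c + 1) - 2 < k) := by omega
    simp [this]
  | succ n ih =>
    intro c hc
    rw [pvLoopA]
    have hmono : (2:Int) ^ (c + 1) ≤ 2 ^ C := by
      apply pow_le_pow_right₀ (by norm_num) (by omega)
    have hcond : (2:Int) ^ (c + 1) - 2 < k := by omega
    simp only [hcond, if_true]
    have htn : ((c : Int) + 1).toNat = c + 1 := by omega
    have harith : (2:Int) ^ (c + 1) - 2 + 2 ^ ((c : Int) + 1).toNat = 2 ^ (c + 1 + 1) - 2 := by
      rw [htn]; ring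
    rw [harith]
    have := ih (c + 1) (by omega)
    push_cast at this ⊢
    exact this

-- ===== VERDICT (by name: the statement is the Claim_ definition above) =====
theorem kthLuckyNumber_spec : Claim_equal_kthLuckyNumber := by
  intro k _ hk
  have hk1 : 1 ≤ k := hk
  have hm : ((k + 1).toNat : Int) = k + 1 := by omega
  set m : Nat := (k + 1).toNat with hmdef
  have hm2 : 2 ≤ m := by omega
  set C : Nat := Nat.log2 m with hCdef
  have hCl : 2 ^ C ≤ m := Nat.log2_self_le (by omega)
  have hCh : m < 2 ^ (C + 1) := Nat.lt_log2_self
  have hC1 : 1 ≤ C := (Nat.le_log2 (by omega)).mpr (by simpa using hm2)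
  have hpowsucc : 2 ^ (C + 1) = 2 * 2 ^ C := by ring
  set p : Nat := m - 2 ^ C with hpdef
  have hp : p < 2 ^ C := by omega
  have hmsplit : m = 2 ^ C + p := by omega
  have hloI : (2:Int) ^ C ≤ k + 1 := by
    rw [← hm]; exact_mod_cast hCl
  have hhiI : k + 1 < 2 ^ (C + 1) := by
    rw [← hm]; exact_mod_cast hCh
  have hloop : pvLoopA k 0 0 = ((C : Int), 2 ^ (C + 1) - 2) := by
    have h := pvLoopClimb k C hloI hhiI C 0 (by omega)
    norm_num at h
    exact h
  unfold Spec_kthLuckyNumber kthLuckyNumber kthLuckyNumber_alt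
  rw [hloop]
  simp only [Int.toNat_natCast]
  -- position = (p : Int)
  have hpos : k - ((2:Int) ^ (C + 1) - 2 - 2 ^ C) - 1 = (p : Int) := by
    have hpowc : (((2:Nat) ^ C : Nat) : Int) = (2:Int) ^ C := by push_cast; ring
    have h1 : ((p : Nat) : Int) = (m : Int) - (2:Int) ^ C := by
      rw [← hpowc]; omega
    have hIpow : (2:Int) ^ (C + 1) = 2 * 2 ^ C := by ring
    rw [h1, hm, hIpow]; ring
  rw [hpos]
  -- A's bin(position)[2:]
  have hbinA : PySem.List.slice (PySem.Int.toBinChars0b (p : Int)) (some 2) none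
      = Nat.toDigits 2 p := by
    unfold PySem.Int.toBinChars0b
    have hnn : ¬ ((p : Int) < 0) := by omega
    simp only [hnn, if_false, Int.toNat_natCast]
    rw [PySem.List.slice_from ('0' :: 'b' :: Nat.toDigits 2 p) (by norm_num : (0:Int) ≤ 2)]
    rfl
  -- B's bin(k+1)[3:]
  have hbinB : PySem.List.slice (PySem.Int.toBinChars0b (k + 1)) (some 3) none
      = (Nat.toDigits 2 m).drop 1 := by
    unfold PySem.Int.toBinChars0b
    have hnn : ¬ (k + 1 < 0) := by omega
    simp only [hnn, if_false, ← hmdef]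
    rw [PySem.List.slice_from ('0' :: 'b' :: Nat.toDigits 2 m) (by norm_num : (0:Int) ≤ 3)]
    rfl
  rw [hbinA, hbinB]
  have hlen : (Nat.toDigits 2 p).length ≤ C :=
    Nat.toDigits_length 2 p C (by omega) hp
  rw [pvZfillDigits (Nat.toDigits 2 p) C hlen (pvToDigitsMem p) (pvToDigitsNeNil p)]
  rw [hmsplit, pvBinSplit C p hC1 hp]
  simp only [List.drop_succ_cons, List.drop_zero]
  congr 1
  apply List.map_congr_left
  intro x hx
  have hx01 : x = '0' ∨ x = '1' := by
    rcases List.mem_append.mp hx with h1 | h1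
    · left; exact List.eq_of_mem_replicate h1
    · exact pvToDigitsMem p x h1
  rcases hx01 with h1 | h1 <;> subst h1 <;> rfl
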